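-- pv_equiv track=rewrite | github.com/gabozako/AlgoQueen | suy2on/CodingTest/2022_KT/2.py | solution
-- ===== SOURCE A (Python) =====
-- def solution(replies, n, k):
--     answer = []
--
--     def is_good(string):
--         # 길이는 n - len(문자열) // k
--         for l in range(n, len(string)//k+1):
--             for start in range(len(string)-l+1):
--                 word = string[start:start+l]
--                 same = 0
--                 for p in range(start, len(string)-l+1,l):
--                     if string[p:p+l] != word:
--                         break
--                     same += 1
--                     # 불량
--                     if same >= k:
--                         return 0
--
--         return 1
--
--     for reply in replies:
--         answer.append(is_good(reply))
--
--
--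
--
--     return answer
-- ===== SOURCE B (Python) =====
-- def solution(replies, n, k):
--     def is_bad(s):
--         m = len(s)
--         return any(
--             s[start:start + l] * k == s[start:start + l * k]
--             for l in range(n, m // k + 1)
--             for start in range(m - l * k + 1)
--         )
--     return [0 if is_bad(r) else 1 for r in replies]
-- ===== Notes on version B (the rewrite author's own statement) =====
-- stated objective: simpler
-- what changed: B drops A's innermost block-by-block scanning loop with its match counter and break, and instead tests each candidate (length, start) with a single string-repetition equality s[start:start+l]*k == s[start:start+l*k] over exactly the starts that can fit k blocks, written as one any() comprehension.
import Mathlib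
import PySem

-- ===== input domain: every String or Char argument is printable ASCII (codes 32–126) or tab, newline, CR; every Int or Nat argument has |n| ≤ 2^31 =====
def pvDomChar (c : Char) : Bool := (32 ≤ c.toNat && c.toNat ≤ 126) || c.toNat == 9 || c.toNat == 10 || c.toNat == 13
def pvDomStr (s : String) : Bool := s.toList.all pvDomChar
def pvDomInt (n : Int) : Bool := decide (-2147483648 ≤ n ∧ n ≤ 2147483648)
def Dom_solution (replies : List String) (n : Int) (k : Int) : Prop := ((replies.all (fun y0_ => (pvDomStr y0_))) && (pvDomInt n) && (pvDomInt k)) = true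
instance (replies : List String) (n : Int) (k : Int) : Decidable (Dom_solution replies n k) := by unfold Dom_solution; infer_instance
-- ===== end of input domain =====

-- B replaces A's innermost block-scanning loop (counter + break) by a single string-repetition
-- equality test per candidate start; objective: simpler (same asymptotic cost).

-- ===== PORT A =====
-- inner loop: 'for p in range(start, len(s)-l+1, l): if s[p:p+l] != word: break; same += 1; if same >= k: return 0'
def solutionInner (s : List Char) (l : Int) (word : List Char) (k : Int) : List Int → Int → Bool
  | [], _ => false
  | p :: ps, same =>
    if PySem.List.slice s (some p) (some (p + l)) ≠ word then false
    else if same + 1 ≥ k then true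
    else solutionInner s l word k ps (same + 1)

-- 'def is_good(string): …' (returns 0 when the triple loop hits 'return 0', else 1)
def solutionIsGood (s : List Char) (n k : Int) : Int :=
  if (PySem.List.pyRange n (PySem.Int.floordiv (s.length : Int) k + 1) 1).any (fun l =>
      (PySem.List.pyRange 0 ((s.length : Int) - l + 1) 1).any (fun start =>
        solutionInner s l (PySem.List.slice s (some start) (some (start + l))) k
          (PySem.List.pyRange start ((s.length : Int) - l + 1) l) 0))
  then 0 else 1

def solution (replies : List String) (n : Int) (k : Int) : List Int :=
  replies.foldl (fun answer reply => answer ++ [solutionIsGood reply.toList n k]) []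

-- ===== PORT B =====
-- 'any(s[start:start+l] * k == s[start:start+l*k] …)'
def solutionIsBad (s : List Char) (n k : Int) : Bool :=
  (PySem.List.pyRange n (PySem.Int.floordiv (s.length : Int) k + 1) 1).any (fun l =>
    (PySem.List.pyRange 0 ((s.length : Int) - l * k + 1) 1).any (fun start =>
      PySem.List.pyRepeat (PySem.List.slice s (some start) (some (start + l))) k
        == PySem.List.slice s (some start) (some (start + l * k))))

def solution_alt (replies : List String) (n : Int) (k : Int) : List Int :=
  replies.map (fun reply => if solutionIsBad reply.toList n k then 0 else 1)

-- ===== PRECONDITION & SPEC =====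
-- Pre_ excludes exactly the inputs on which A raises: k = 0 (ZeroDivisionError in len(s)//k) and
-- n ≤ 0 ≤ len(s)//k for some reply (range(start, …, 0) with step l = 0 raises ValueError).
def Pre_solution (replies : List String) (n : Int) (k : Int) : Prop :=
  ∀ s ∈ replies, k ≠ 0 ∧ ¬(n ≤ 0 ∧ 0 ≤ PySem.Int.floordiv (s.toList.length : Int) k)
instance (replies : List String) (n : Int) (k : Int) : Decidable (Pre_solution replies n k) := by unfold Pre_solution; infer_instance
def pvWitness_solution : List String × Int × Int := (["abab", "abc"], 2, 2)

def Spec_solution (replies : List String) (n : Int) (k : Int) (out : List Int) : Prop := out = solution_alt replies n k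
instance (replies : List String) (n : Int) (k : Int) (out : List Int) : Decidable (Spec_solution replies n k out) := by unfold Spec_solution; infer_instance

-- ===== CLAIM (what is proved, stated in full; the proofs are below) =====
def Claim_equal_solution : Prop := ∀ (replies : List String) (n : Int) (k : Int), Dom_solution replies n k → Pre_solution replies n k → Spec_solution replies n k (solution replies n k)

-- ===== LEMMAS AND PROOFS =====

theorem pvRange_pos_nil (a b st : Int) (hs : 0 < st) (h : b ≤ a) :
    PySem.List.pyRange a b st = [] := by
  simp [PySem.List.pyRange, hs.ne', not_lt.mpr h, hs]
theorem pvRange_pos_cons (a b st : Int) (hs : 0 < st) (h : a < b) :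
    PySem.List.pyRange a b st = a :: PySem.List.pyRange (a + st) b st := by
  rw [PySem.List.pyRange_of_pos _ _ hs, PySem.List.pyRange_of_pos _ _ hs]
  rw [if_pos h]
  have hN : 0 ≤ b - a - 1 := by omega
  have e1 : b - a + st - 1 = (b - a - 1) + 1 * st := by ring
  have e2 : (b - a + st - 1) / st = (b - a - 1) / st + 1 := by
    rw [e1, Int.add_mul_ediv_right _ _ hs.ne']
  by_cases hc : a + st < b
  · rw [if_pos hc]
    have e3 : b - (a + st) + st - 1 = b - a - 1 := by ring
    rw [e3, e2]
    have h4 : 0 ≤ (b - a - 1) / st := Int.ediv_nonneg hN hs.le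
    have h5 : ((b - a - 1) / st + 1).toNat = ((b - a - 1) / st).toNat + 1 := by omega
    rw [h5, List.range_succ_eq_map]
    simp only [List.map_cons, List.map_map, Nat.cast_zero, mul_zero, add_zero]
    congr 1
    apply List.map_congr_left
    intro x _
    simp [Function.comp, Nat.succ_eq_add_one]
    ring
  · rw [if_neg hc]
    have h6 : b - a - 1 < st := by omega
    have h7 : (b - a - 1) / st = 0 := Int.ediv_eq_zero_of_lt hN h6
    rw [e2, h7]
    simp

theorem pvRange_neg_nil (a b st : Int) (hs : st < 0) (h : a ≤ b) :
    PySem.List.pyRange a b st = [] := by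
  simp only [PySem.List.pyRange, if_neg hs.ne, if_neg (not_lt.mpr hs.le), if_neg (not_lt.mpr h)]
  simp

theorem pvSliceLen (s : List Char) (a d : Int) (ha : 0 ≤ a) (hd : 0 ≤ d)
    (h : a + d ≤ (s.length : Int)) :
    (PySem.List.slice s (some a) (some (a + d))).length = d.toNat := by
  rw [PySem.List.slice_toNat _ ha (by omega)]
  simp only [List.length_take, List.length_drop]
  omega
theorem pvSliceSplit (s : List Char) (a b c : Int) (ha : 0 ≤ a) (hab : a ≤ b) (hbc : b ≤ c) :
    PySem.List.slice s (some a) (some c)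
      = PySem.List.slice s (some a) (some b) ++ PySem.List.slice s (some b) (some c) := by
  rw [PySem.List.slice_toNat _ ha (by omega), PySem.List.slice_toNat _ ha (by omega),
      PySem.List.slice_toNat _ (by omega : (0:Int) ≤ b) (by omega)]
  have h1 : c.toNat - a.toNat = (b.toNat - a.toNat) + (c.toNat - b.toNat) := by omega
  rw [h1, List.take_add, List.drop_drop]
  have h2 : a.toNat + (b.toNat - a.toNat) = b.toNat := by omega
  rw [h2]

theorem pvInnerChar (s : List Char) (l k : Int) (word : List Char) (hl : 1 ≤ l) :
    ∀ (c : Nat) (start : Int), 1 ≤ c →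
      (solutionInner s l word k (PySem.List.pyRange start ((s.length : Int) - l + 1) l) (k - c) = true
       ↔ start + c * l ≤ (s.length : Int) ∧
         ∀ i : Nat, i < c →
           PySem.List.slice s (some (start + i * l)) (some (start + i * l + l)) = word) := by
  intro c
  induction c with
  | zero => intro start h; omega
  | succ c ih =>
    intro start _
    by_cases hin : start < (s.length : Int) - l + 1
    · rw [pvRange_pos_cons _ _ _ (by omega) hin]
      unfold solutionInner
      by_cases hw : PySem.List.slice s (some start) (some (start + l)) = word
      · rw [if_neg (by simpa using hw)]
        rcases Nat.eq_zero_or_pos c with hc | hc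
        · subst hc
          rw [if_pos (by omega)]
          constructor
          · intro _
            refine ⟨by push_cast; omega, ?_⟩
            intro i hi
            interval_cases i
            simpa using hw
          · intro _; rfl
        · rw [if_neg (by push_cast; omega)]
          have e : k - ((c+1 : Nat) : Int) + 1 = k - (c : Nat) := by push_cast; ring
          rw [e]
          rw [ih (start + l) hc]
          have e3 : ((c:Int)+1) * l = (c:Int)*l + l := by ring
          constructor
          · rintro ⟨h1, h2⟩
            constructor
            · push_cast at h1 ⊢; omega
            · intro i hi
              match i, hi with
              | 0, _ => simpa using hw
              | (j+1), hj =>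
                have := h2 j (by omega)
                have e2 : start + l + (j:Int) * l = start + ((j+1 : Nat) : Int) * l := by push_cast; ring
                rw [e2] at this
                exact this
          · rintro ⟨h1, h2⟩
            constructor
            · push_cast at h1 ⊢; omega
            · intro i hi
              have := h2 (i+1) (by omega)
              have e2 : start + ((i+1 : Nat) : Int) * l = start + l + (i:Int) * l := by push_cast; ring
              rw [e2] at this
              exact this
      · rw [if_pos (by simpa using hw)]
        simp only [Bool.false_eq_true, false_iff]
        rintro ⟨h1, h2⟩
        exact hw (by simpa using h2 0 (by omega))
    · rw [pvRange_pos_nil _ _ _ (by omega) (by omega)]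
      unfold solutionInner
      simp only [Bool.false_eq_true, false_iff]
      rintro ⟨h1, _⟩
      have h3 : (0:Int) ≤ (c:Int) * l := by positivity
      push_cast at h1
      have h4 : ((c:Int)+1) * l = (c:Int)*l + l := by ring
      omega

theorem pvRepChar (s : List Char) (l : Int) (hl : 1 ≤ l) :
    ∀ (c : Nat) (start : Int) (w : List Char), 0 ≤ start →
      start + c * l ≤ (s.length : Int) → w.length = l.toNat →
      ((List.replicate c w).flatten = PySem.List.slice s (some start) (some (start + c * l))
       ↔ ∀ i : Nat, i < c →
           PySem.List.slice s (some (start + i * l)) (some (start + i * l + l)) = w) := by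
  intro c
  induction c with
  | zero =>
    intro start w hs hb hw
    simp only [List.replicate_zero, List.flatten_nil, Nat.cast_zero, zero_mul, add_zero]
    rw [PySem.List.slice_toNat _ hs hs]
    simp
  | succ c ih =>
    intro start w hs hb hw
    have hcl : (0:Int) ≤ (c:Int) * l := by positivity
    have e3 : ((c:Int)+1) * l = (c:Int)*l + l := by ring
    have hsplit : PySem.List.slice s (some start) (some (start + (c+1 : Nat) * l))
        = PySem.List.slice s (some start) (some (start + l))
          ++ PySem.List.slice s (some (start + l)) (some (start + (c+1 : Nat) * l)) := by
      apply pvSliceSplit s start (start + l) _ hs (by omega)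
      push_cast; omega
    have hlen : (PySem.List.slice s (some start) (some (start + l))).length = l.toNat := by
      apply pvSliceLen s start l hs (by omega)
      push_cast at hb; omega
    rw [hsplit]
    simp only [List.replicate_succ, List.flatten_cons]
    constructor
    · intro h
      obtain ⟨h1, h2⟩ := List.append_inj h (by rw [hlen, hw])
      intro i hi
      match i, hi with
      | 0, _ => simpa using h1.symm
      | (j+1), hj =>
        have e4 : start + ((c+1:Nat)) * l = (start + l) + (c:Int) * l := by push_cast; ring
        rw [e4] at h2
        have := (ih (start + l) w (by omega) (by push_cast at hb ⊢; omega) hw).mp h2 j (by omega)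
        have e2 : start + l + (j:Int) * l = start + ((j+1 : Nat) : Int) * l := by push_cast; ring
        rw [e2] at this
        exact this
    · intro h
      have h0 := h 0 (by omega)
      simp only [Nat.cast_zero, zero_mul, add_zero] at h0
      have e4 : start + ((c+1:Nat)) * l = (start + l) + (c:Int) * l := by push_cast; ring
      rw [e4]
      have htail : (List.replicate c w).flatten
          = PySem.List.slice s (some (start + l)) (some ((start + l) + (c:Int) * l)) := by
        rw [ih (start + l) w (by omega) (by push_cast at hb ⊢; omega) hw]
        intro i hi
        have := h (i+1) (by omega)
        have e2 : start + ((i+1 : Nat) : Int) * l = start + l + (i:Int) * l := by push_cast; ring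
        rw [e2] at this
        exact this
      rw [h0, ← htail]


-- per-length equality of the two start-scans (main case 1 ≤ k, 1 ≤ l, l*k ≤ len)
theorem pvPerL (s : List Char) (l k : Int) (hk : 1 ≤ k) (hl : 1 ≤ l) :
    ((PySem.List.pyRange 0 ((s.length : Int) - l + 1) 1).any (fun start =>
        solutionInner s l (PySem.List.slice s (some start) (some (start + l))) k
          (PySem.List.pyRange start ((s.length : Int) - l + 1) l) 0))
    = ((PySem.List.pyRange 0 ((s.length : Int) - l * k + 1) 1).any (fun start =>
        PySem.List.pyRepeat (PySem.List.slice s (some start) (some (start + l))) k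
          == PySem.List.slice s (some start) (some (start + l * k)))) := by
  have hkt : ((k.toNat : Int)) = k := Int.toNat_of_nonneg (by omega)
  have hkt1 : 1 ≤ k.toNat := by omega
  have hc : (1:Int) * l ≤ (k.toNat : Int) * l := by
    apply mul_le_mul_of_nonneg_right _ (by omega)
    omega
  rw [Bool.eq_iff_iff]
  simp only [List.any_eq_true, PySem.List.mem_pyRange_one]
  constructor
  · rintro ⟨start, ⟨hs0, hsu⟩, hA⟩
    have e0 : (0:Int) = k - (k.toNat : Int) := by omega
    rw [e0] at hA
    obtain ⟨hb, hblocks⟩ := (pvInnerChar s l k _ hl k.toNat start hkt1).mp hA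
    have hword : (PySem.List.slice s (some start) (some (start + l))).length = l.toNat :=
      pvSliceLen s start l hs0 (by omega) (by omega)
    refine ⟨start, ⟨hs0, by rw [hkt] at hb; nlinarith⟩, ?_⟩
    rw [beq_iff_eq]
    show (List.replicate k.toNat _).flatten = _
    have e1 : start + l * k = start + (k.toNat : Int) * l := by rw [hkt]; ring
    rw [e1]
    exact (pvRepChar s l hl k.toNat start _ hs0 hb hword).mpr hblocks
  · rintro ⟨start, ⟨hs0, hsu⟩, hB⟩
    have hb : start + (k.toNat : Int) * l ≤ (s.length : Int) := by rw [hkt]; nlinarith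
    have hword : (PySem.List.slice s (some start) (some (start + l))).length = l.toNat :=
      pvSliceLen s start l hs0 (by omega) (by omega)
    rw [beq_iff_eq] at hB
    have hB' : (List.replicate k.toNat (PySem.List.slice s (some start) (some (start + l)))).flatten
        = PySem.List.slice s (some start) (some (start + (k.toNat : Int) * l)) := by
      have e1 : start + (k.toNat : Int) * l = start + l * k := by rw [hkt]; ring
      rw [e1]
      exact hB
    have hblocks := (pvRepChar s l hl k.toNat start _ hs0 hb hword).mp hB'
    refine ⟨start, ⟨hs0, by omega⟩, ?_⟩
    have e0 : (0:Int) = k - (k.toNat : Int) := by omega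
    rw [e0]
    exact (pvInnerChar s l k _ hl k.toNat start hkt1).mpr ⟨hb, hblocks⟩

-- per-reply equality: the two outer any-scans agree
theorem pvAnyEq (s : List Char) (n k : Int) (hk : k ≠ 0)
    (hn : ¬(n ≤ 0 ∧ 0 ≤ PySem.Int.floordiv (s.length : Int) k)) :
    ((PySem.List.pyRange n (PySem.Int.floordiv (s.length : Int) k + 1) 1).any (fun l =>
      (PySem.List.pyRange 0 ((s.length : Int) - l + 1) 1).any (fun start =>
        solutionInner s l (PySem.List.slice s (some start) (some (start + l))) k
          (PySem.List.pyRange start ((s.length : Int) - l + 1) l) 0)))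
    = ((PySem.List.pyRange n (PySem.Int.floordiv (s.length : Int) k + 1) 1).any (fun l =>
      (PySem.List.pyRange 0 ((s.length : Int) - l * k + 1) 1).any (fun start =>
        PySem.List.pyRepeat (PySem.List.slice s (some start) (some (start + l))) k
          == PySem.List.slice s (some start) (some (start + l * k))))) := by
  by_cases hk1 : 1 ≤ k
  · have hkpos : (0:Int) < k := by omega
    have h0 : 0 ≤ PySem.Int.floordiv (s.length : Int) k := by
      rw [PySem.Int.floordiv_eq_ediv_of_pos hkpos]
      exact Int.ediv_nonneg (by positivity) (by omega)
    have hn1 : 1 ≤ n := by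
      by_contra h
      exact hn ⟨by omega, h0⟩
    apply PySem.List.any_congr_mem
    intro l hlmem
    rw [PySem.List.mem_pyRange_one] at hlmem
    have hl1 : 1 ≤ l := by omega
    exact pvPerL s l k hk1 hl1
  · have hkneg : k ≤ -1 := by omega
    have hfd : PySem.Int.floordiv (s.length : Int) k ≤ 0 := by
      by_contra hpos
      push Not at hpos
      have hq := PySem.Int.floordiv_mul_add_mod (s.length : Int) k
      have hr := PySem.Int.mod_neg_bounds (s.length : Int) (by omega : k < 0)
      have hm : PySem.Int.floordiv (s.length : Int) k * k ≤ 1 * k :=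
        mul_le_mul_of_nonpos_right (by omega) (by omega)
      omega
    apply PySem.List.any_congr_mem
    intro l hlmem
    rw [PySem.List.mem_pyRange_one] at hlmem
    have hl0 : l ≤ 0 := by omega
    have hl1 : l ≤ -1 := by
      rcases eq_or_lt_of_le hl0 with h' | h'
      · exact absurd ⟨by omega, by omega⟩ hn
      · omega
    trans false
    · rw [List.any_eq_false]
      intro start hsmem
      rw [PySem.List.mem_pyRange_one] at hsmem
      rw [pvRange_neg_nil start ((s.length : Int) - l + 1) l (by omega) (by omega)]
      simp [solutionInner]
    · symm
      rw [List.any_eq_false]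
      intro start hsmem
      rw [PySem.List.mem_pyRange_one] at hsmem
      have hlk1 : (1:Int) ≤ l * k := by
        have := mul_pos_of_neg_of_neg (show l < 0 by omega) (show k < 0 by omega)
        omega
      have hrep : PySem.List.pyRepeat (PySem.List.slice s (some start) (some (start + l))) k = [] := by
        simp [PySem.List.pyRepeat, Int.toNat_of_nonpos (show k ≤ 0 by omega)]
      have hslen : (PySem.List.slice s (some start) (some (start + l * k))).length = (l * k).toNat :=
        pvSliceLen s start (l * k) (by omega) (by omega) (by omega)
      rw [hrep]
      simp only [beq_iff_eq]
      intro heq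
      rw [← heq] at hslen
      simp at hslen
      omega

theorem pvPerString (s : List Char) (n k : Int) (hk : k ≠ 0)
    (hn : ¬(n ≤ 0 ∧ 0 ≤ PySem.Int.floordiv (s.length : Int) k)) :
    solutionIsGood s n k = if solutionIsBad s n k then 0 else 1 := by
  unfold solutionIsGood solutionIsBad
  rw [pvAnyEq s n k hk hn]

-- ===== VERDICT (by name: the statement is the Claim_ definition above) =====
theorem solution_spec : Claim_equal_solution := by
  intro replies n k _hdom hpre
  unfold Spec_solution solution solution_alt
  rw [PySem.List.foldl_append_singleton_eq_map]
  rw [List.nil_append]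
  apply List.map_congr_left
  intro r hr
  exact pvPerString r.toList n k (hpre r hr).1 (hpre r hr).2
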